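-- pv_equiv track=rewrite | github.com/aliyun/plugsched | boundary/extract.py | merge_down_fn
-- ===== SOURCE A (Python) =====
-- def merge_down_fn(lines, curr):
--     """Merge down multi-lines-function-definition into one line"""
--     merged = ''
--     start = curr
--     l_brace = lines[curr].count('{')
--     r_brace = lines[curr].count('}')
--
--     while l_brace == 0 or l_brace > r_brace:
--         merged += lines[curr].strip() + ' '
--         lines[curr] = ''
--         curr += 1
--         l_brace += lines[curr].count('{')
--         r_brace += lines[curr].count('}')
--
--     merged += lines[curr]
--     lines[curr] = ''
--     lines[start] = merged
--     return curr
-- ===== SOURCE B (Python) =====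
-- def merge_down_fn(lines, curr):
--     """Merge down multi-lines-function-definition into one line.
--
--     Character-level reformulation: instead of keeping two per-line brace
--     counters, walk the characters of each line with a single nesting-depth
--     counter plus a 'seen a brace' flag (depth +1 on '{', -1 on '}'); the
--     definition ends at the first line after which a brace has been seen and
--     the depth is back to <= 0.  Recursion on the line index replaces A's
--     while loop.  (Both versions mutate `lines` in place; the equivalence
--     proved is about the RETURN value.)"""
--     def scan(cs, depth, seen):
--         for ch in cs:
--             if ch == '{':
--                 depth, seen = depth + 1, True
--             elif ch == '}':
--                 depth -= 1
--         return depth, seen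
--
--     def end_of(i, depth, seen):
--         depth, seen = scan(lines[i], depth, seen)
--         if seen and depth <= 0:
--             return i
--         return end_of(i + 1, depth, seen)
--
--     end = end_of(curr, 0, False)
--     merged = ''.join(lines[i].strip() + ' ' for i in range(curr, end)) + lines[end]
--     for i in range(curr, end + 1):
--         lines[i] = ''
--     lines[curr] = merged
--     return end
-- ===== Notes on version B (the rewrite author's own statement) =====
-- stated objective: alternative
-- what changed: Replaces A's per-line double bookkeeping (separate cumulative '{' and '}' counts interleaved with string building and clearing) by a character-level state machine: a single nesting-depth counter plus a seen-a-brace flag driven over the characters of each line, with recursion on the line index locating the end before a separate join-and-clear pass.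
import Mathlib
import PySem

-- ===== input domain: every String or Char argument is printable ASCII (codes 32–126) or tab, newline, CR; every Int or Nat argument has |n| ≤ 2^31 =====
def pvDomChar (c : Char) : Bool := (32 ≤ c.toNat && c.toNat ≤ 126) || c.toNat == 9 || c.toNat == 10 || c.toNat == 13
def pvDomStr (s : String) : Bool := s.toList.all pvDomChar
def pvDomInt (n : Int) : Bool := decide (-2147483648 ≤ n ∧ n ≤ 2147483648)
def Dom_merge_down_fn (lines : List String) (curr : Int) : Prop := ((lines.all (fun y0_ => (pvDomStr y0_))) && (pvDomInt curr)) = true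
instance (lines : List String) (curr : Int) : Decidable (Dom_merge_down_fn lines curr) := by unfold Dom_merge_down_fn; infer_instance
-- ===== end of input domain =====

-- B replaces A's per-line double brace bookkeeping (cumulative '{' and '}' counts interleaved
-- with string building and clearing) by a character-level state machine (one nesting-depth
-- counter plus a seen-a-brace flag) with recursion on the line index, then a separate
-- join-and-clear pass; equivalence is about the RETURN value (both Pythons also mutate
-- `lines` in place, identically wherever A returns).

-- ===== PORT A =====
-- A's while loop: interleaved state (curr, merged, l_brace, r_brace); the fuel only guards
-- totality (inside Pre_ the loop stops before it runs out).
def pvMergeLoopA (lines : List String) : Nat → Int → String → Int → Int → Int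
  | 0, curr, _, _, _ => curr
  | fuel+1, curr, merged, l, r =>
    if l = 0 ∨ l > r then
      let merged := merged ++ PySem.Str.strip (PySem.List.pyGetD lines curr "") ++ " "
      let curr := curr + 1
      let s := PySem.List.pyGetD lines curr ""
      pvMergeLoopA lines fuel curr merged (l + (PySem.Str.count s "{" : Int)) (r + (PySem.Str.count s "}" : Int))
    else
      curr  -- exit: merged += lines[curr]; the writes to `lines` are side effects, not the return value

def merge_down_fn (lines : List String) (curr : Int) : Int :=
  let s0 := PySem.List.pyGetD lines curr ""
  pvMergeLoopA lines (2 * lines.length + 1) curr ""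
    ((PySem.Str.count s0 "{" : Int)) ((PySem.Str.count s0 "}" : Int))

-- ===== PORT B =====
-- B's `scan`: a for-loop over the characters of one line driving (depth, seen)
def pvScanChars : List Char → Int → Bool → Int × Bool
  | [], depth, seen => (depth, seen)
  | c :: rest, depth, seen =>
    if c = '{' then pvScanChars rest (depth + 1) true
    else if c = '}' then pvScanChars rest (depth - 1) seen
    else pvScanChars rest depth seen

-- B's `end_of`: recursion on the line index; the fuel only guards totality (inside Pre_
-- the recursion stops before it runs out).
def pvEndOf (lines : List String) : Nat → Int → Int → Bool → Int
  | 0, i, _, _ => i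
  | fuel+1, i, depth, seen =>
    let st := pvScanChars (PySem.List.pyGetD lines i "").toList depth seen
    if st.2 ∧ st.1 ≤ 0 then i else pvEndOf lines fuel (i + 1) st.1 st.2

def merge_down_fn_alt (lines : List String) (curr : Int) : Int :=
  let e := pvEndOf lines (2 * lines.length + 2) curr 0 false
  -- B's second pass (''.join of the stripped span plus the last line, then the clears)
  -- only mutates `lines`; the joined string is built but is not part of the return value.
  let merged := PySem.Str.join ""
      ((PySem.List.pyRange curr e 1).map
        (fun i => PySem.Str.strip (PySem.List.pyGetD lines i "") ++ " "))
    ++ PySem.List.pyGetD lines e ""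
  let _ := merged
  e

-- ===== PRECONDITION & SPEC =====
-- cumulative count of brace ch over lines[curr..curr+j] (Python indexing)
def pvBal (lines : List String) (curr : Int) (j : Nat) (ch : String) : Int :=
  ((List.range (j + 1)).map
    (fun (k : Nat) => (PySem.Str.count (PySem.List.pyGetD lines (curr + (k : Int)) "") ch : Int))).sum

-- Pre_ = exactly the inputs where the Python A returns (no IndexError): curr is a valid index
-- and the brace balance closes (l ≠ 0 ∧ l ≤ r) within j < len(lines) further lines, at an
-- in-range position (so the scan stops before running off the end or, for negative curr,
-- before re-reading a line the loop already cleared).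
def Pre_merge_down_fn (lines : List String) (curr : Int) : Prop :=
  (PySem.List.pyGet? lines curr).isSome ∧
  ∃ j ∈ List.range lines.length,
    curr + (j : Int) < lines.length ∧
    pvBal lines curr j "{" ≠ 0 ∧ pvBal lines curr j "{" ≤ pvBal lines curr j "}"
instance (lines : List String) (curr : Int) : Decidable (Pre_merge_down_fn lines curr) := by
  unfold Pre_merge_down_fn; infer_instance

def pvWitness_merge_down_fn : List String × Int := (["int f(void)", "{", "}"], 0)

def Spec_merge_down_fn (lines : List String) (curr : Int) (out : Int) : Prop := out = merge_down_fn_alt lines curr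
instance (lines : List String) (curr : Int) (out : Int) : Decidable (Spec_merge_down_fn lines curr out) := by unfold Spec_merge_down_fn; infer_instance

-- ===== CLAIM (what is proved, stated in full; the proofs are below) =====
def Claim_equal_merge_down_fn : Prop := ∀ (lines : List String) (curr : Int), Dom_merge_down_fn lines curr → Pre_merge_down_fn lines curr → Spec_merge_down_fn lines curr (merge_down_fn lines curr)

-- ===== LEMMAS AND PROOFS =====
-- Python's s.count(c) for a single-character needle is the plain character count.
theorem pvCountGo_single (c : Char) :
    ∀ (s : List Char) (fuel acc : Nat), s.length ≤ fuel →
      PySem.Chars.count.go [c] fuel s acc = acc + s.count c := by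
  intro s
  induction s with
  | nil => intro fuel acc _; cases fuel <;> simp [PySem.Chars.count.go]
  | cons h t ih =>
    intro fuel acc hle
    match fuel, hle with
    | fuel+1, hle =>
      have hlen : t.length ≤ fuel := by simpa using hle
      by_cases hc : h = c
      · have hp : List.isPrefixOf [c] (h :: t) = true := by simp [List.isPrefixOf, hc]
        rw [show PySem.Chars.count.go [c] (fuel+1) (h::t) acc
            = if List.isPrefixOf [c] (h::t) then PySem.Chars.count.go [c] fuel (List.drop [c].length (h::t)) (acc+1)
              else PySem.Chars.count.go [c] fuel t acc from rfl]
        rw [hp]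
        simp only [if_true, List.length_singleton, List.drop_succ_cons, List.drop_zero]
        rw [ih fuel (acc+1) hlen]
        simp [hc]
        omega
      · have hp : List.isPrefixOf [c] (h :: t) = false := by
          simp [List.isPrefixOf]; exact fun h' => hc h'.symm
        rw [show PySem.Chars.count.go [c] (fuel+1) (h::t) acc
            = if List.isPrefixOf [c] (h::t) then PySem.Chars.count.go [c] fuel (List.drop [c].length (h::t)) (acc+1)
              else PySem.Chars.count.go [c] fuel t acc from rfl]
        rw [hp]
        simp only [Bool.false_eq_true, if_false]
        rw [ih fuel acc hlen]
        simp [hc]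

theorem pvStrCount_single (s : String) (c : Char) (lit : String) (hl : lit.toList = [c]) :
    PySem.Str.count s lit = s.toList.count c := by
  simp only [PySem.Str.count, PySem.Chars.count, hl]
  rw [if_neg (by simp)]
  simpa using pvCountGo_single c s.toList s.toList.length 0 le_rfl

-- B's character scan computes exactly the (depth, seen) summary of the two brace counts.
theorem pvScan_eq (cs : List Char) :
    ∀ (d : Int) (sn : Bool),
      pvScanChars cs d sn
        = (d + (cs.count '{' : Int) - (cs.count '}' : Int),
           sn || decide (0 < cs.count '{')) := by
  induction cs with
  | nil => intro d sn; simp [pvScanChars]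
  | cons c t ih =>
    intro d sn
    simp only [pvScanChars, List.count_cons]
    by_cases h1 : c = '{'
    · subst h1
      rw [if_pos rfl, ih]
      refine Prod.ext ?_ ?_
      · simp; ring
      · simp
    · rw [if_neg h1]
      by_cases h2 : c = '}'
      · subst h2
        rw [if_pos rfl, ih]
        refine Prod.ext ?_ ?_
        · simp; ring
        · simp
      · rw [if_neg h2, ih]
        refine Prod.ext ?_ ?_
        · simp [h1, h2]
        · simp [h1]

-- one recursion step of B's end_of
theorem pvEndOf_step (lines : List String) (fuel : Nat) (i d : Int) (s : Bool) :
    pvEndOf lines (fuel + 1) i d s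
      = if (pvScanChars (PySem.List.pyGetD lines i "").toList d s).2
           ∧ (pvScanChars (PySem.List.pyGetD lines i "").toList d s).1 ≤ 0
        then i
        else pvEndOf lines fuel (i + 1)
               (pvScanChars (PySem.List.pyGetD lines i "").toList d s).1
               (pvScanChars (PySem.List.pyGetD lines i "").toList d s).2 := rfl

-- merging the seen flag: seen ∨ this line opened a brace  ↔  cumulative opens ≠ 0
theorem pvFlag_merge (x : Int) (n : Nat) (hx : 0 ≤ x) :
    (decide (x ≠ 0) || decide (0 < n)) = decide (x + (n : Int) ≠ 0) := by
  by_cases h1 : x = 0 <;> by_cases h2 : n = 0 <;> simp [h1, h2] <;> omega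

-- cumulative count over the j lines AFTER position c (proof-side helper)
def pvCum (lines : List String) (ch : String) : Nat → Int → Int
  | 0, _ => 0
  | j+1, c => (PySem.Str.count (PySem.List.pyGetD lines (c + 1) "") ch : Int) + pvCum lines ch j (c + 1)

theorem pvBal_succ (lines : List String) (c : Int) (j : Nat) (ch : String) :
    pvBal lines c (j + 1) ch
      = (PySem.Str.count (PySem.List.pyGetD lines c "") ch : Int) + pvBal lines (c + 1) j ch := by
  unfold pvBal
  rw [List.range_succ_eq_map, List.map_cons, List.map_map, List.sum_cons]
  congr 1
  · simp
  · apply congrArg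
    apply List.map_congr_left
    intro k _
    simp only [Function.comp_apply]
    have hk : c + ((Nat.succ k : Nat) : Int) = c + 1 + (k : Int) := by push_cast; ring
    rw [hk]

theorem pvBal_eq_cum (lines : List String) (ch : String) :
    ∀ (j : Nat) (c : Int),
      pvBal lines c j ch
        = (PySem.Str.count (PySem.List.pyGetD lines c "") ch : Int) + pvCum lines ch j c := by
  intro j
  induction j with
  | zero => intro c; simp [pvBal, pvCum]
  | succ j ih =>
    intro c
    rw [pvBal_succ, ih (c + 1)]
    simp [pvCum]

-- Main invariant: from a synchronized state (position c, A's counters l r vs B's depth l - r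
-- and flag l ≠ 0), A's fueled loop equals B's end_of recursion (which next reads line c + 1),
-- provided a stopping point is reachable within the fuel and within the list.
theorem pvLoop_eq (lines : List String) :
    ∀ (fuel : Nat) (c l r : Int) (merged : String), 0 ≤ l →
      (∃ j : Nat, j ≤ fuel ∧ c + (j : Int) < lines.length ∧
        l + pvCum lines "{" j c ≠ 0 ∧
        l + pvCum lines "{" j c ≤ r + pvCum lines "}" j c) →
      pvMergeLoopA lines fuel c merged l r
        = if l ≠ 0 ∧ l ≤ r then c
          else pvEndOf lines fuel (c + 1) (l - r) (decide (l ≠ 0)) := by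
  intro fuel
  induction fuel with
  | zero =>
    intro c l r merged _ ⟨j, hj, _, h1, h2⟩
    have hj0 : j = 0 := by omega
    subst hj0
    simp only [pvCum, add_zero] at h1 h2
    simp only [pvMergeLoopA]
    rw [if_pos ⟨h1, h2⟩]
  | succ fuel ih =>
    intro c l r merged hl ⟨j, hj, hlt, h1, h2⟩
    by_cases hs : l ≠ 0 ∧ l ≤ r
    · rw [if_pos hs]
      simp only [pvMergeLoopA]
      rw [if_neg (by omega)]
    · rw [if_neg hs]
      match j, hj, hlt, h1, h2 with
      | 0, _, _, h1, h2 =>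
        exfalso; simp [pvCum] at h1 h2; exact hs ⟨h1, h2⟩
      | j+1, hj, hlt, h1, h2 =>
        set lc : Nat := PySem.Str.count (PySem.List.pyGetD lines (c + 1) "") "{" with hlc
        set rc : Nat := PySem.Str.count (PySem.List.pyGetD lines (c + 1) "") "}" with hrc
        simp only [pvMergeLoopA]
        rw [if_pos (by omega)]
        have hrec := ih (c + 1) (l + (lc : Int)) (r + (rc : Int))
          (merged ++ PySem.Str.strip (PySem.List.pyGetD lines c "") ++ " ")
          (by positivity)
          ⟨j, by omega, by push_cast at hlt ⊢; omega,
            by simp only [pvCum, ← hlc] at h1 ⊢; omega,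
            by simp only [pvCum, ← hlc, ← hrc] at h1 h2 ⊢; omega⟩
        rw [hrec]
        -- unfold one step of B
        rw [pvEndOf_step, pvScan_eq]
        have hopen : (PySem.List.pyGetD lines (c + 1) "").toList.count '{' = lc := by
          rw [hlc, pvStrCount_single _ '{' "{" rfl]
        have hclose : (PySem.List.pyGetD lines (c + 1) "").toList.count '}' = rc := by
          rw [hrc, pvStrCount_single _ '}' "}" rfl]
        rw [hopen, hclose]
        rw [pvFlag_merge l lc hl]
        have hd : l - r + (lc : Int) - (rc : Int) = l + (lc : Int) - (r + (rc : Int)) := by ring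
        simp only [hd, decide_eq_true_eq]
        split_ifs with hp hq hq
        · rfl
        · exact absurd ⟨hp.1, by omega⟩ hq
        · exact absurd ⟨hq.1, by omega⟩ hp
        · rfl

-- ===== VERDICT (by name: the statement is the Claim_ definition above) =====
theorem merge_down_fn_spec : Claim_equal_merge_down_fn := by
  intro lines curr _ hpre
  obtain ⟨hsome, j, hjmem, hlt, h1, h2⟩ := hpre
  have hjlen : j < lines.length := List.mem_range.mp hjmem
  unfold Spec_merge_down_fn
  simp only [pvBal_eq_cum] at h1 h2
  set l0 : Nat := PySem.Str.count (PySem.List.pyGetD lines curr "") "{" with hl0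
  set r0 : Nat := PySem.Str.count (PySem.List.pyGetD lines curr "") "}" with hr0
  have hmain := pvLoop_eq lines (2 * lines.length + 1) curr (l0 : Int) (r0 : Int) ""
    (by positivity) ⟨j, by omega, hlt, by exact_mod_cast h1, by exact_mod_cast h2⟩
  have hA : merge_down_fn lines curr
      = pvMergeLoopA lines (2 * lines.length + 1) curr "" (l0 : Int) (r0 : Int) := rfl
  have hB : merge_down_fn_alt lines curr
      = pvEndOf lines (2 * lines.length + 2) curr 0 false := rfl
  have hopen : (PySem.List.pyGetD lines curr "").toList.count '{' = l0 := by
    rw [hl0, pvStrCount_single _ '{' "{" rfl]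
  have hclose : (PySem.List.pyGetD lines curr "").toList.count '}' = r0 := by
    rw [hr0, pvStrCount_single _ '}' "}" rfl]
  rw [hA, hB, hmain]
  -- unfold the first step of B's recursion (it reads line curr from the initial state)
  show _ = pvEndOf lines (2 * lines.length + 1 + 1) curr 0 false
  conv_rhs => rw [pvEndOf_step, pvScan_eq, hopen, hclose]
  simp only [Bool.false_or, zero_add, decide_eq_true_eq]
  split_ifs with hp hq hq
  · rfl
  · exact absurd ⟨by omega, by omega⟩ hq
  · exact absurd ⟨by omega, by omega⟩ hp
  · congr 1
    simp only [decide_eq_decide]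
    omega
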